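-- pv_equiv track=rewrite | github.com/JvanMeurs/AdventOfCode2024 | day14/day14.py | total_distance_sum
-- ===== SOURCE A (Python) =====
-- def distance_sum (arr, n):
--     arr.sort()
--
--     res = 0
--     sum = 0
--     for i in range(n):
--         res += (arr[i] * i - sum)
--         sum += arr[i]
--
--     return res
--
-- def total_distance_sum( data ):
--     x = []
--     y = []
--     n = len(data)
--     for robot in data.keys():
--         x.append(data[robot]["pos"][0])
--         y.append(data[robot]["pos"][1])
--     return distance_sum(x, n) + distance_sum(y, n)
-- ===== SOURCE B (Python) =====
-- def total_distance_sum(data):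
--     pts = [(data[r]["pos"][0], data[r]["pos"][1]) for r in data]
--     total = 0
--     rest = pts
--     while rest:
--         (x0, y0), rest = rest[0], rest[1:]
--         for (x1, y1) in rest:
--             total += abs(x0 - x1) + abs(y0 - y1)
--     return total
-- ===== Notes on version B (the rewrite author's own statement) =====
-- stated objective: alternative
-- what changed: Replaces the per-axis sort + prefix-sum identity with a direct double loop over all unordered pairs of robot positions, accumulating abs(dx)+abs(dy) per pair without sorting.
import Mathlib
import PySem

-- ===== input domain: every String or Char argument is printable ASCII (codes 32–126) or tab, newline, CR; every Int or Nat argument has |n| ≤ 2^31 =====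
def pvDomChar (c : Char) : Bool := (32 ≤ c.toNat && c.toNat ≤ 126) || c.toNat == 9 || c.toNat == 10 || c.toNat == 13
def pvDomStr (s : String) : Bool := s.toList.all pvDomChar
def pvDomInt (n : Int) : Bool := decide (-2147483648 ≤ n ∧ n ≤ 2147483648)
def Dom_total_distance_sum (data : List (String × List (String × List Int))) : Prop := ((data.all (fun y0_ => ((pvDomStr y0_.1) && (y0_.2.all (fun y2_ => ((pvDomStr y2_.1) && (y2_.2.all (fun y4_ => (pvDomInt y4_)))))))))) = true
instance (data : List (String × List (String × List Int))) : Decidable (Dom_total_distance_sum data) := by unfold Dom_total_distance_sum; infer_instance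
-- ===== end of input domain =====

-- B replaces A's per-axis sort + prefix-sum identity with a direct double loop over unordered
-- pairs of positions (alternative decomposition, not faster; A sorts its local x/y lists only,
-- the caller's dict is untouched).


-- ===== PORT A =====
-- helper distance_sum(arr, n): sort, then prefix-sum loop over range(n).
-- At both call sites n = len(arr), so index i is always in range: the pyGetD default 0 is never used.
def distance_sumA (arr : List Int) (n : Int) : Int :=
  let arr2 := PySem.List.sorted arr (fun v => v) false
  let st := (PySem.List.pyRange 0 n 1).foldl
    (fun (p : Int × Int) i =>
      (p.1 + (PySem.List.pyGetD arr2 i 0 * i - p.2), p.2 + PySem.List.pyGetD arr2 i 0))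
    (0, 0)
  st.1

def total_distance_sum (data : List (String × List (String × List Int))) : Int :=
  let n : Int := (data.length : Int)
  let xy := (data.map Prod.fst).foldl
    (fun (p : List Int × List Int) robot =>
      let d := ((PySem.Dict.mk data).get? robot).getD []
      let pos := ((PySem.Dict.mk d).get? "pos").getD []
      (p.1 ++ [PySem.List.pyGetD pos 0 0], p.2 ++ [PySem.List.pyGetD pos 1 0]))
    ([], [])
  distance_sumA xy.1 n + distance_sumA xy.2 n

-- ===== PORT B =====
-- while rest: take the head position, add |dx|+|dy| against every later position.
def pairLoopB : List (Int × Int) → Int → Int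
  | [], total => total
  | p :: rest, total =>
      pairLoopB rest (rest.foldl (fun t q => t + (|p.1 - q.1| + |p.2 - q.2|)) total)

def total_distance_sum_alt (data : List (String × List (String × List Int))) : Int :=
  let pts := (data.map Prod.fst).map
    (fun robot =>
      let d := ((PySem.Dict.mk data).get? robot).getD []
      let pos := ((PySem.Dict.mk d).get? "pos").getD []
      (PySem.List.pyGetD pos 0 0, PySem.List.pyGetD pos 1 0))
  pairLoopB pts 0

-- ===== PRECONDITION & SPEC =====
-- Pre_ excludes exactly the inputs where Python A raises: a robot whose dict entry has no
-- "pos" key (KeyError) or whose "pos" list has fewer than 2 coordinates (IndexError).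
def Pre_total_distance_sum (data : List (String × List (String × List Int))) : Prop :=
  ∀ p ∈ data,
    ((PySem.Dict.mk (((PySem.Dict.mk data).get? p.1).getD [])).get? "pos").isSome = true ∧
    2 ≤ (((PySem.Dict.mk (((PySem.Dict.mk data).get? p.1).getD [])).get? "pos").getD []).length
instance (data : List (String × List (String × List Int))) : Decidable (Pre_total_distance_sum data) := by unfold Pre_total_distance_sum; infer_instance

def pvWitness_total_distance_sum : (List (String × List (String × List Int))) :=
  [("a", [("pos", [0, 0]), ("vel", [1, 1])]), ("b", [("pos", [3, 4])])]

def Spec_total_distance_sum (data : List (String × List (String × List Int))) (out : Int) : Prop := out = total_distance_sum_alt data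
instance (data : List (String × List (String × List Int))) (out : Int) : Decidable (Spec_total_distance_sum data out) := by unfold Spec_total_distance_sum; infer_instance

-- ===== CLAIM (what is proved, stated in full; the proofs are below) =====
def Claim_equal_total_distance_sum : Prop := ∀ (data : List (String × List (String × List Int))), Dom_total_distance_sum data → Pre_total_distance_sum data → Spec_total_distance_sum data (total_distance_sum data)

-- ===== LEMMAS AND PROOFS =====

-- sum over unordered pairs of |a - b|, recursing on the head
def pairAbs : List Int → Int
  | [] => 0
  | a :: t => (t.map (fun b => |a - b|)).sum + pairAbs t

-- sum over ordered pairs (earlier, later) of (later - earlier)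
def pdiff : List Int → Int
  | [] => 0
  | a :: t => (t.map (fun b => b - a)).sum + pdiff t

-- state machine of A's prefix-sum loop: (res, sum) stepped once per element, i the running index
def loopA : List Int → Int → (Int × Int) → (Int × Int)
  | [], _, st => st
  | a :: t, i, st => loopA t (i + 1) (st.1 + (a * i - st.2), st.2 + a)

theorem sum_map_shift (t : List Int) (k s a : Int) :
    (t.map (fun x => x * (k + 1) - (s + a))).sum
      = (t.map (fun x => x * k - s)).sum + (t.map (fun b => b - a)).sum := by
  induction t with
  | nil => simp
  | cons x t ih =>
    simp only [List.map_cons, List.sum_cons]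
    rw [ih]; ring

theorem loopA_spec (t : List Int) : ∀ (k s res : Int),
    (loopA t k (res, s)).1 = res + (t.map (fun x => x * k - s)).sum + pdiff t := by
  induction t with
  | nil => intro k s res; simp [loopA, pdiff]
  | cons a t ih =>
    intro k s res
    show (loopA t (k + 1) (res + (a * k - s), s + a)).1 = _
    rw [ih, sum_map_shift]
    simp only [pdiff, List.map_cons, List.sum_cons]
    ring

theorem foldA (t : List Int) : ∀ (c : List Int) (st : Int × Int),
    (PySem.List.pyRange (c.length : Int) ((c.length + t.length : Nat) : Int) 1).foldl
      (fun (p : Int × Int) i =>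
        (p.1 + (PySem.List.pyGetD (c ++ t) i 0 * i - p.2), p.2 + PySem.List.pyGetD (c ++ t) i 0))
      st
    = loopA t (c.length : Int) st := by
  induction t with
  | nil =>
    intro c st
    rw [PySem.List.pyRange_one_eq_nil (by simp)]
    simp [loopA]
  | cons a t ih =>
    intro c st
    rw [PySem.List.pyRange_one_cons (by push_cast [List.length_cons]; omega)]
    simp only [List.foldl_cons]
    have hget : PySem.List.pyGetD (c ++ a :: t) (c.length : Int) 0 = a := by
      rw [PySem.List.pyGetD_natCast, List.getD_eq_getElem?_getD]
      simp
    rw [hget]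
    have harr : c ++ a :: t = (c ++ [a]) ++ t := by simp
    have hlen : ((c.length : Int) + 1) = ((c ++ [a]).length : Int) := by simp
    have hlen2 : ((c.length + (a :: t).length : Nat) : Int)
        = (((c ++ [a]).length + t.length : Nat) : Int) := by simp; omega
    rw [harr, hlen, hlen2, ih (c ++ [a])]
    simp [loopA]

theorem pairAbs_perm {l l' : List Int} (h : l.Perm l') : pairAbs l = pairAbs l' := by
  induction h with
  | nil => rfl
  | cons a h ih =>
    simp only [pairAbs, ih]
    rw [List.Perm.sum_eq (List.Perm.map _ h)]
  | swap a b l =>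
    simp only [pairAbs, List.map_cons, List.sum_cons]
    rw [abs_sub_comm b a]
    ring
  | trans _ _ ih1 ih2 => rw [ih1, ih2]

theorem pdiff_eq_pairAbs_of_sorted : ∀ (l : List Int),
    l.Pairwise (fun a b => a ≤ b) → pdiff l = pairAbs l := by
  intro l
  induction l with
  | nil => intro _; rfl
  | cons a t ih =>
    intro hl
    rcases List.pairwise_cons.mp hl with ⟨hhead, htail⟩
    simp only [pdiff, pairAbs, ih htail]
    have hmap : t.map (fun b => b - a) = t.map (fun b => |a - b|) := by
      apply List.map_congr_left
      intro b hb
      rw [abs_of_nonpos (by have := hhead b hb; omega : a - b ≤ 0)]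
      ring
    rw [hmap]

theorem distance_sumA_eq (arr : List Int) (n : Int) (hn : n = (arr.length : Int)) :
    distance_sumA arr n = pairAbs arr := by
  simp only [distance_sumA]
  have hfold := foldA (PySem.List.sorted arr (fun v => v) false) [] (0, 0)
  simp only [List.nil_append, List.length_nil, Nat.cast_zero, Nat.zero_add] at hfold
  rw [hn, show ((arr.length : Nat) : Int) = (((PySem.List.sorted arr (fun v => v) false).length : Nat) : Int)
      by rw [PySem.List.length_sorted]]
  rw [hfold, loopA_spec]
  have hcross : ((PySem.List.sorted arr (fun v => v) false).map (fun x => x * 0 - 0)).sum = 0 := by simp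
  rw [hcross, pdiff_eq_pairAbs_of_sorted _ (PySem.List.sorted_pairwise arr (fun v => v)),
      pairAbs_perm (PySem.List.sorted_perm arr (fun v => v) false)]
  ring

theorem foldl_pair_append {α : Type} (xs : List α) (f g : α → Int) :
    ∀ (a1 a2 : List Int),
    xs.foldl (fun (p : List Int × List Int) r => (p.1 ++ [f r], p.2 ++ [g r])) (a1, a2)
      = (a1 ++ xs.map f, a2 ++ xs.map g) := by
  induction xs with
  | nil => intro a1 a2; simp
  | cons x xs ih => intro a1 a2; simp [ih]

theorem pairLoopB_spec (pts : List (Int × Int)) : ∀ (total : Int),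
    pairLoopB pts total = total + pairAbs (pts.map Prod.fst) + pairAbs (pts.map Prod.snd) := by
  induction pts with
  | nil => intro total; simp [pairLoopB, pairAbs]
  | cons p rest ih =>
    intro total
    simp only [pairLoopB, ih, List.map_cons, pairAbs]
    rw [PySem.List.foldl_add rest (fun (q : Int × Int) => |p.1 - q.1| + |p.2 - q.2|) total]
    rw [PySem.List.sum_map_add_int rest (fun q => |p.1 - q.1|) (fun q => |p.2 - q.2|)]
    simp only [List.map_map, Function.comp_def]
    ring

-- ===== VERDICT (by name: the statement is the Claim_ definition above) =====
theorem total_distance_sum_spec : Claim_equal_total_distance_sum := by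
  intro data _ _
  show total_distance_sum data = total_distance_sum_alt data
  unfold total_distance_sum total_distance_sum_alt
  simp only []
  rw [foldl_pair_append]
  simp only [List.nil_append]
  rw [distance_sumA_eq _ _ (by simp), distance_sumA_eq _ _ (by simp), pairLoopB_spec]
  simp only [List.map_map, Function.comp_def]
  ring
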